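-- pv_equiv track=rewrite | github.com/theCodeTeen/CP_Collection | google codejam/sorting/Reversort engineering/Answer.py | ArrayOpp
-- ===== SOURCE A (Python) =====
-- def ArrayOpp(no,cost):
--     if cost<no-1:
--         return []
--     arr=[]
--     t=0
--     c=1
--     for i in range(no-1,0,-1):
--         c+=1
--
--         if t+c+i-1>=cost:
--             r=cost-t-i+1
--             arr.append(r)
--             for k in range(i-1):
--                 arr.append(1)
--             t=cost
--             break
--
--         t+=c
--         arr.append(c)
--     if t<cost:
--         return[]
--     return arr
-- ===== SOURCE B (Python) =====
-- def ArrayOpp(no, cost):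
--     if no <= 1:
--         return []
--     maxc = no * (no + 1) // 2 - 1
--     if cost < no - 1 or cost > maxc:
--         return []
--     arr = [1] * (no - 1)
--     extra = cost - (no - 1)
--     j = 0
--     while extra > 0:
--         add = min(extra, j + 1)
--         arr[j] += add
--         extra -= add
--         j += 1
--     return arr
-- ===== Notes on version B (the rewrite author's own statement) =====
-- stated objective: simpler
-- what changed: Replaces A's greedy fill-until-break loop (growing the array value by value and re-checking a break condition each step) by closed-form feasibility bounds (no-1 <= cost <= no*(no+1)//2 - 1) plus a baseline [1]*(no-1) array over which the surplus cost-(no-1) is distributed left to right.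
import Mathlib
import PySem

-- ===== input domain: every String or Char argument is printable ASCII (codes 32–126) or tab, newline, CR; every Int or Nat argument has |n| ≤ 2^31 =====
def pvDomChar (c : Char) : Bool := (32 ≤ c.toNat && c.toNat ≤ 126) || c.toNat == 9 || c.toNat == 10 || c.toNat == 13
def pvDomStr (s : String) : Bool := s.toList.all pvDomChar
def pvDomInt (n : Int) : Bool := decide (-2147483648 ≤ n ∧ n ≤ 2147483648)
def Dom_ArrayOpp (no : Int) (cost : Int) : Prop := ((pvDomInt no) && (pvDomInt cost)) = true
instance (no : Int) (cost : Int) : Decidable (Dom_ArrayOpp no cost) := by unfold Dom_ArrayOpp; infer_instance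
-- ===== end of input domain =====

-- B replaces A's greedy fill-until-break loop by explicit feasibility bounds plus a
-- baseline-[1]*(no-1)-and-distribute-surplus pass (objective: simpler).

-- ===== PORT A =====
-- A's for-loop with break, as structural recursion over the range list;
-- state (arr, t, c); returns (arr, t).  The inner 'for k in range(i-1): arr.append(1)'
-- ignores k, so it is ported exactly as appending (i-1).toNat ones.
def aLoop (cost : Int) : List Int → List Int → Int → Int → (List Int × Int)
  | [], arr, t, _c => (arr, t)
  | i :: rest, arr, t, c =>
    let c' := c + 1
    if t + c' + i - 1 ≥ cost then
      (arr ++ [cost - t - i + 1] ++ List.replicate (i - 1).toNat 1, cost)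
    else
      aLoop cost rest (arr ++ [c']) (t + c') c'

def ArrayOpp (no : Int) (cost : Int) : List Int :=
  if cost < no - 1 then []
  else
    let p := aLoop cost (PySem.List.pyRange (no - 1) 0 (-1)) [] 0 1
    if p.2 < cost then [] else p.1

-- ===== PORT B =====
-- B's while-loop; j only ever takes values 0,1,2,…, so it is carried as a Nat;
-- arr[j] is in range on every reachable state (extra ≤ 1+2+…+(len arr)), so getD/set are exact.
def bLoop (arr : List Int) (extra : Int) (j : Nat) : List Int :=
  if h : 0 < extra then
    let add := min extra ((j : Int) + 1)
    bLoop (arr.set j (arr.getD j 0 + add)) (extra - add) (j + 1)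
  else arr
termination_by extra.toNat
decreasing_by omega

def ArrayOpp_alt (no : Int) (cost : Int) : List Int :=
  if no ≤ 1 then []
  else
    let maxc := PySem.Int.floordiv (no * (no + 1)) 2 - 1
    if cost < no - 1 ∨ maxc < cost then []
    else bLoop (List.replicate (no - 1).toNat 1) (cost - (no - 1)) 0

-- ===== PRECONDITION & SPEC =====
def Spec_ArrayOpp (no : Int) (cost : Int) (out : List Int) : Prop := out = ArrayOpp_alt no cost
instance (no : Int) (cost : Int) (out : List Int) : Decidable (Spec_ArrayOpp no cost out) := by unfold Spec_ArrayOpp; infer_instance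

-- ===== CLAIM (what is proved, stated in full; the proofs are below) =====
def Claim_equal_ArrayOpp : Prop := ∀ (no : Int) (cost : Int), Dom_ArrayOpp no cost → Spec_ArrayOpp no cost (ArrayOpp no cost)

-- ===== LEMMAS AND PROOFS =====

-- [n, n-1, …, 1] as a function of a Nat
def descL : Nat → List Int
  | 0 => []
  | n + 1 => ((n + 1 : Nat) : Int) :: descL n

-- T n j = (j+1) + (j+2) + … + (j+n): total surplus positions j..j+n-1 can absorb
def T : Nat → Nat → Nat
  | 0, _ => 0
  | n + 1, j => (j + 1) + T n (j + 1)

-- the common shape of both results: n entries from position j, surplus e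
def build : Nat → Nat → Int → List Int
  | 0, _, _ => []
  | n + 1, j, e => (1 + min e ((j : Int) + 1)) :: build n (j + 1) (e - min e ((j : Int) + 1))

theorem aLoop_nil (cost : Int) (arr : List Int) (t c : Int) :
    aLoop cost [] arr t c = (arr, t) := rfl

theorem aLoop_cons (cost i : Int) (rest : List Int) (arr : List Int) (t c : Int) :
    aLoop cost (i :: rest) arr t c =
      if t + (c + 1) + i - 1 ≥ cost then
        (arr ++ [cost - t - i + 1] ++ List.replicate (i - 1).toNat 1, cost)
      else
        aLoop cost rest (arr ++ [c + 1]) (t + (c + 1)) (c + 1) := rfl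

theorem pyRange_desc (n : Nat) : PySem.List.pyRange (n : Int) 0 (-1) = descL n := by
  induction n with
  | zero => exact PySem.List.pyRange_neg_one_eq_nil (by simp)
  | succ n ih =>
      rw [PySem.List.pyRange_neg_one_cons (by exact_mod_cast Nat.succ_pos n)]
      have h : ((n + 1 : Nat) : Int) - 1 = (n : Int) := by push_cast; ring
      rw [descL, h, ih]

theorem build_zero (n j : Nat) : build n j 0 = List.replicate n 1 := by
  induction n generalizing j with
  | zero => rfl
  | succ n ih =>
      have hmin : min (0 : Int) ((j : Int) + 1) = 0 := by omega
      simp [build, hmin, ih, List.replicate_succ]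

theorem T_eq (n j : Nat) : 2 * T n j = n * (2 * j + n + 1) := by
  induction n generalizing j with
  | zero => simp [T]
  | succ n ih =>
      show 2 * ((j + 1) + T n (j + 1)) = (n + 1) * (2 * j + (n + 1) + 1)
      rw [Nat.mul_add, ih (j + 1)]; ring

theorem bLoop_build (n : Nat) : ∀ (j : Nat) (pre : List Int) (e : Int),
    pre.length = j → 0 ≤ e → e ≤ (T n j : Int) →
    bLoop (pre ++ List.replicate n 1) e j = pre ++ build n j e := by
  induction n with
  | zero =>
      intro j pre e hlen h0 hle
      have he : e = 0 := by simp [T] at hle; omega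
      rw [bLoop]; simp [he, build]
  | succ n ih =>
      intro j pre e hlen h0 hle
      rw [bLoop]
      by_cases hpos : 0 < e
      · simp only [dif_pos hpos]
        have hget : (pre ++ List.replicate (n + 1) 1).getD j 0 = 1 := by
          subst hlen
          simp [List.replicate_succ, List.getD_eq_getElem?_getD]
        have hset : ∀ v : Int, (pre ++ List.replicate (n + 1) 1).set j v
            = (pre ++ [v]) ++ List.replicate n 1 := by
          intro v; subst hlen
          simp [List.replicate_succ, List.append_assoc]
        set add := min e ((j : Int) + 1) with hadd
        have hTj : (T (n + 1) j : Int) = ((j : Int) + 1) + (T n (j + 1) : Int) := by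
          simp only [T]; push_cast; ring
        have h1 : 0 ≤ e - add := by omega
        have h2 : e - add ≤ (T n (j + 1) : Int) := by rw [hTj] at hle; omega
        rw [hget, hset, ih (j + 1) (pre ++ [1 + add]) (e - add) (by simp [hlen]) h1 h2]
        have hb : build (n + 1) j e = (1 + add) :: build n (j + 1) (e - add) := by
          rw [build, hadd]
        rw [hb]; simp
      · simp only [dif_neg hpos]
        have he : e = 0 := by omega
        rw [he, build_zero]

theorem aLoop_break (n : Nat) : ∀ (j : Nat) (pre : List Int) (t cost : Int),
    0 ≤ cost - t - ((n : Int) + 1) → cost - t - ((n : Int) + 1) ≤ (T (n + 1) j : Int) →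
    aLoop cost (descL (n + 1)) pre t ((j : Int) + 1)
      = (pre ++ build (n + 1) j (cost - t - ((n : Int) + 1)), cost) := by
  induction n with
  | zero =>
      intro j pre t cost h0 hle
      have hT : (T 1 j : Int) = (j : Int) + 1 := by simp [T]
      rw [hT] at hle
      rw [show descL 1 = (1 : Int) :: descL 0 from rfl, aLoop_cons]
      rw [if_pos (by push_cast at h0 hle ⊢; omega)]
      have hb : build 1 j (cost - t - (((0:Nat) : Int) + 1))
          = [1 + min (cost - t - (((0:Nat) : Int) + 1)) ((j : Int) + 1)] := rfl
      rw [hb]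
      have h1 : cost - t - 1 + 1 = 1 + min (cost - t - (((0:Nat) : Int) + 1)) ((j : Int) + 1) := by
        push_cast; omega
      simp [h1]
  | succ n ih =>
      intro j pre t cost h0 hle
      set e := cost - t - ((n : Int) + 1 + 1) with he
      have he' : cost - t - (((n + 1 : Nat) : Int) + 1) = e := by push_cast; omega
      rw [he'] at h0 hle
      have hTj : (T (n + 2) j : Int) = ((j : Int) + 1) + (T (n + 1) (j + 1) : Int) := by
        simp only [T]; push_cast; ring
      rw [show descL (n + 2) = ((n + 2 : Nat) : Int) :: descL (n + 1) from rfl, aLoop_cons, he']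
      by_cases hbr : e ≤ (j : Int) + 1
      · -- break now: r = e + 1 followed by all ones
        rw [if_pos (by push_cast; omega)]
        have hrep : (((n + 2 : Nat) : Int) - 1).toNat = n + 1 := by push_cast; omega
        have hr : cost - t - ((n + 2 : Nat) : Int) + 1 = 1 + e := by push_cast; omega
        have hmin : min e ((j : Int) + 1) = e := by omega
        have hb : build (n + 2) j e = (1 + e) :: build (n + 1) (j + 1) (e - e) := by
          rw [build, hmin]
        rw [hrep, hr, hb, sub_self, build_zero]
        simp
      · -- no break: append c+1 = j+2 and recurse
        rw [if_neg (by push_cast; rw [hTj] at hle; omega)]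
        have hstep := ih (j + 1) (pre ++ [(j : Int) + 1 + 1]) (t + ((j : Int) + 1 + 1)) cost
          (by push_cast; omega)
          (by rw [hTj] at hle; push_cast; omega)
        have hj1 : (((j + 1 : Nat)) : Int) + 1 = (j : Int) + 1 + 1 := by push_cast; ring
        rw [hj1] at hstep
        rw [hstep]
        have harg : cost - (t + ((j : Int) + 1 + 1)) - ((n : Int) + 1) = e - ((j : Int) + 1) := by
          rw [he]; ring
        rw [harg]
        have hmin : min e ((j : Int) + 1) = (j : Int) + 1 := by omega
        have hb : build (n + 2) j e = (1 + ((j : Int) + 1)) :: build (n + 1) (j + 1) (e - ((j : Int) + 1)) := by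
          rw [build, hmin]
        rw [hb]
        have hc : (j : Int) + 1 + 1 = 1 + ((j : Int) + 1) := by ring
        rw [hc]
        simp

theorem aLoop_nobreak (n : Nat) : ∀ (j : Nat) (pre : List Int) (t cost : Int),
    (T n j : Int) < cost - t - (n : Int) →
    (aLoop cost (descL n) pre t ((j : Int) + 1)).2 < cost := by
  induction n with
  | zero => intro j pre t cost h; rw [show descL 0 = [] from rfl, aLoop_nil]; simp [T] at h; omega
  | succ n ih =>
      intro j pre t cost h
      have hTj : (T (n + 1) j : Int) = ((j : Int) + 1) + (T n (j + 1) : Int) := by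
        simp only [T]; push_cast; ring
      have hT0 : (0 : Int) ≤ (T n (j + 1) : Int) := by exact_mod_cast Nat.zero_le _
      rw [show descL (n + 1) = ((n + 1 : Nat) : Int) :: descL n from rfl, aLoop_cons]
      rw [if_neg (by rw [hTj] at h; push_cast at h ⊢; omega)]
      have hstep := ih (j + 1) (pre ++ [(j : Int) + 1 + 1]) (t + ((j : Int) + 1 + 1)) cost
        (by rw [hTj] at h; push_cast at h ⊢; omega)
      have hj1 : (((j + 1 : Nat)) : Int) + 1 = (j : Int) + 1 + 1 := by push_cast; ring
      rw [hj1] at hstep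
      exact hstep

theorem floordiv_two_mul (k : Int) : PySem.Int.floordiv (2 * k) 2 = k := by
  rw [PySem.Int.floordiv_eq_ediv_of_pos (by norm_num)]
  exact Int.mul_ediv_cancel_left k (by norm_num)

-- ===== VERDICT (by name: the statement is the Claim_ definition above) =====
theorem ArrayOpp_spec : Claim_equal_ArrayOpp := by
  intro no cost _dom
  unfold Spec_ArrayOpp
  by_cases hno : no ≤ 1
  · -- pyRange is empty; A returns [] through every branch, B via its guard
    have hr : PySem.List.pyRange (no - 1) 0 (-1) = [] :=
      PySem.List.pyRange_neg_one_eq_nil (by omega)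
    simp only [ArrayOpp, ArrayOpp_alt, hr, aLoop_nil, if_pos hno]
    split_ifs <;> rfl
  · push_neg at hno
    obtain ⟨m, hmi⟩ : ∃ m : Nat, (m : Int) = no - 1 :=
      ⟨(no - 1).toNat, Int.toNat_of_nonneg (by omega)⟩
    have htn : (no - 1).toNat = m := by omega
    have hm1 : 1 ≤ m := by omega
    -- relation between the floordiv bound and T m 0
    have hmax : PySem.Int.floordiv (no * (no + 1)) 2 - 1 = (T m 0 : Int) + (m : Int) := by
      have hT : (2 * T m 0 : Int) = (m : Int) * ((m : Int) + 1) := by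
        have h := T_eq m 0
        simp only [Nat.mul_zero, Nat.zero_add] at h
        exact_mod_cast h
      have h2 : no * (no + 1) = 2 * ((T m 0 : Int) + (m : Int) + 1) := by
        have hno' : no = (m : Int) + 1 := by omega
        rw [hno']; nlinarith [hT]
      rw [h2, floordiv_two_mul]; ring
    have hrange : PySem.List.pyRange (no - 1) 0 (-1) = descL m := by
      rw [← hmi, pyRange_desc]
    simp only [ArrayOpp, ArrayOpp_alt, if_neg (by omega : ¬ no ≤ 1), hmax, hrange, htn]
    by_cases hlo : cost < no - 1
    · simp [hlo]
    · rw [if_neg hlo]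
      by_cases hhi : (T m 0 : Int) + (m : Int) < cost
      · -- above the maximum: A's loop runs out with t < cost, so both return []
        rw [if_pos (Or.inr hhi)]
        have hnb := aLoop_nobreak m 0 [] 0 cost (by push_cast; omega)
        simp only [Nat.cast_zero, zero_add] at hnb
        rw [if_pos hnb]
      · -- feasible: both produce build m 0 (cost - (no - 1))
        rw [if_neg (not_or.mpr ⟨hlo, hhi⟩)]
        obtain ⟨m', hm'⟩ : ∃ m', m = m' + 1 := ⟨m - 1, by omega⟩
        have hbr := aLoop_break m' 0 [] 0 cost
          (by push_cast at hmi ⊢; omega) (by rw [← hm']; push_cast at hhi hmi ⊢; omega)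
        simp only [Nat.cast_zero, zero_add] at hbr
        have hb := bLoop_build m 0 [] (cost - (no - 1)) rfl (by omega)
          (by push_cast at hhi hmi ⊢; omega)
        simp only [List.nil_append] at hb hbr
        have harg : cost - 0 - ((m' : Int) + 1) = cost - (no - 1) := by
          rw [hm'] at hmi; push_cast at hmi ⊢; omega
        rw [harg] at hbr
        rw [hm', hbr]
        have hni : ¬ ((build (m' + 1) 0 (cost - (no - 1)), cost).2 < cost) := by simp
        rw [if_neg hni, ← hm', hb]
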